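-- pv_equiv track=rewrite | github.com/Shivbaj/Agents | src/agents/implementations/dummy_agent.py | _detect_capabilities_used
-- ===== SOURCE A (Python) =====
-- from typing import Dict, List, Any, Optional
--
-- def _detect_capabilities_used(message: str) -> List[str]:
--     """Detect which capabilities were used in processing"""
--     used_capabilities = []
--
--     if any(word in message for word in ["hello", "hi", "hey", "bye", "goodbye"]):
--         used_capabilities.append("greeting")
--     if "fact" in message or "random" in message:
--         used_capabilities.append("random_facts")
--     if "echo" in message:
--         used_capabilities.append("echo")
--     if any(word in message for word in ["calculate", "math", "+", "-", "*", "/"]):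
--         used_capabilities.append("math_calculations")
--     if "status" in message or "info" in message or "help" in message:
--         used_capabilities.append("system_info")
--
--     return used_capabilities or ["general"]
-- ===== SOURCE B (Python) =====
-- from typing import List
--
-- _KEYWORD_TO_CAP = {
--     "hello": "greeting", "hi": "greeting", "hey": "greeting",
--     "bye": "greeting", "goodbye": "greeting",
--     "fact": "random_facts", "random": "random_facts",
--     "echo": "echo",
--     "calculate": "math_calculations", "math": "math_calculations",
--     "+": "math_calculations", "-": "math_calculations",
--     "*": "math_calculations", "/": "math_calculations",
--     "status": "system_info", "info": "system_info", "help": "system_info",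
-- }
--
-- _CAP_ORDER = ["greeting", "random_facts", "echo", "math_calculations", "system_info"]
--
-- def _detect_capabilities_used(message: str) -> List[str]:
--     # Single scan over message positions: at each position record every
--     # capability whose keyword starts there, then emit caps in canonical order.
--     found = set()
--     for i in range(len(message)):
--         for kw, cap in _KEYWORD_TO_CAP.items():
--             if message.startswith(kw, i):
--                 found.add(cap)
--     caps = [c for c in _CAP_ORDER if c in found]
--     return caps or ["general"]
-- ===== Notes on version B (the rewrite author's own statement) =====
-- stated objective: alternative
-- what changed: Instead of running a separate substring search per capability branch, B makes one scan over the message positions, matching every keyword by startswith at each position into a found-set, then emits capabilities in canonical order (trades C-level substring search for an explicit position loop; same asymptotic cost).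
import Mathlib
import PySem

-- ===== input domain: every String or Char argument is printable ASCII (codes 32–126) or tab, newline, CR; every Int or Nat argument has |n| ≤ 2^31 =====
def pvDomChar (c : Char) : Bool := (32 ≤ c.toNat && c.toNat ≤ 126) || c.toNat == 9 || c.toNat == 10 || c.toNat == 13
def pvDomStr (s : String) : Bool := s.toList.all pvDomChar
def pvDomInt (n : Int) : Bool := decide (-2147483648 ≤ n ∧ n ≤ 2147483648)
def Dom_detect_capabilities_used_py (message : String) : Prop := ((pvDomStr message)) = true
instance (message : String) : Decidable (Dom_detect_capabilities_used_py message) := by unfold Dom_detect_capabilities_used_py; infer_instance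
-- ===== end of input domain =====

-- B replaces A's per-capability substring searches by one scan over message positions matching all keywords into a set (alternative decomposition; same result).


-- ===== PORT A =====
def detect_capabilities_used_py (message : String) : List String :=
  let u0 : List String := []
  let u1 := if ["hello", "hi", "hey", "bye", "goodbye"].any (fun w => PySem.Str.isIn w message) then u0 ++ ["greeting"] else u0
  let u2 := if PySem.Str.isIn "fact" message || PySem.Str.isIn "random" message then u1 ++ ["random_facts"] else u1
  let u3 := if PySem.Str.isIn "echo" message then u2 ++ ["echo"] else u2
  let u4 := if ["calculate", "math", "+", "-", "*", "/"].any (fun w => PySem.Str.isIn w message) then u3 ++ ["math_calculations"] else u3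
  let u5 := if PySem.Str.isIn "status" message || PySem.Str.isIn "info" message || PySem.Str.isIn "help" message then u4 ++ ["system_info"] else u4
  if u5 = [] then ["general"] else u5

-- ===== PORT B =====
def keywordToCap : List (String × String) :=
  [("hello", "greeting"), ("hi", "greeting"), ("hey", "greeting"),
   ("bye", "greeting"), ("goodbye", "greeting"),
   ("fact", "random_facts"), ("random", "random_facts"),
   ("echo", "echo"),
   ("calculate", "math_calculations"), ("math", "math_calculations"),
   ("+", "math_calculations"), ("-", "math_calculations"),
   ("*", "math_calculations"), ("/", "math_calculations"),
   ("status", "system_info"), ("info", "system_info"), ("help", "system_info")]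

def capOrder : List String :=
  ["greeting", "random_facts", "echo", "math_calculations", "system_info"]

-- message.startswith(kw, i) for 0 ≤ i ≤ len(message) is exactly kw.toList.isPrefixOf (message.toList.drop i)
def detect_capabilities_used_py_alt (message : String) : List String :=
  let found : PySem.Set String :=
    (List.range message.toList.length).foldl
      (fun s i =>
        keywordToCap.foldl
          (fun s p => if p.1.toList.isPrefixOf (message.toList.drop i) then PySem.Set.add s p.2 else s) s)
      PySem.Set.empty
  let caps := capOrder.filter (fun c => PySem.Set.contains found c)
  if caps = [] then ["general"] else caps

-- ===== PRECONDITION & SPEC =====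
def Spec_detect_capabilities_used_py (message : String) (out : List String) : Prop := out = detect_capabilities_used_py_alt message
instance (message : String) (out : List String) : Decidable (Spec_detect_capabilities_used_py message out) := by unfold Spec_detect_capabilities_used_py; infer_instance

-- ===== CLAIM (what is proved, stated in full; the proofs are below) =====
def Claim_equal_detect_capabilities_used_py : Prop := ∀ (message : String), Dom_detect_capabilities_used_py message → Spec_detect_capabilities_used_py message (detect_capabilities_used_py message)

-- ===== LEMMAS AND PROOFS =====

-- inner fold over the keyword table: membership characterisation
theorem mem_inner_fold (pairs : List (String × String)) (s : PySem.Set String)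
    (t : List Char) (c : String) :
    c ∈ pairs.foldl (fun s p => if p.1.toList.isPrefixOf t then PySem.Set.add s p.2 else s) s ↔
      c ∈ s ∨ ∃ p ∈ pairs, p.1.toList <+: t ∧ p.2 = c := by
  induction pairs generalizing s with
  | nil => simp
  | cons q qs ih =>
    simp only [List.foldl_cons, ih, List.mem_cons]
    by_cases h : q.1.toList.isPrefixOf t
    · simp only [h, if_pos, PySem.Set.mem_add]
      constructor
      · rintro (( hs | rfl) | ⟨p, hp, h1, h2⟩)
        · exact Or.inl hs
        · exact Or.inr ⟨q, Or.inl rfl, List.isPrefixOf_iff_prefix.mp h, rfl⟩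
        · exact Or.inr ⟨p, Or.inr hp, h1, h2⟩
      · rintro (hs | ⟨p, (rfl | hp), h1, h2⟩)
        · exact Or.inl (Or.inl hs)
        · exact Or.inl (Or.inr h2.symm)
        · exact Or.inr ⟨p, hp, h1, h2⟩
    · simp only [if_neg h]
      constructor
      · rintro (hs | ⟨p, hp, h1, h2⟩)
        · exact Or.inl hs
        · exact Or.inr ⟨p, Or.inr hp, h1, h2⟩
      · rintro (hs | ⟨p, (rfl | hp), h1, h2⟩)
        · exact Or.inl hs
        · exact absurd (List.isPrefixOf_iff_prefix.mpr h1) h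
        · exact Or.inr ⟨p, hp, h1, h2⟩

theorem mem_outer_fold (L : List Nat) (s : PySem.Set String) (msg : List Char) (c : String) :
    c ∈ L.foldl
        (fun s i => keywordToCap.foldl
          (fun s p => if p.1.toList.isPrefixOf (msg.drop i) then PySem.Set.add s p.2 else s) s) s ↔
      c ∈ s ∨ ∃ i ∈ L, ∃ p ∈ keywordToCap, p.1.toList <+: msg.drop i ∧ p.2 = c := by
  induction L generalizing s with
  | nil => simp
  | cons j js ih =>
    simp only [List.foldl_cons, ih, mem_inner_fold, List.mem_cons]
    constructor
    · rintro ((hs | ⟨p, hp, h1, h2⟩) | ⟨i, hi, hrest⟩)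
      · exact Or.inl hs
      · exact Or.inr ⟨j, Or.inl rfl, p, hp, h1, h2⟩
      · exact Or.inr ⟨i, Or.inr hi, hrest⟩
    · rintro (hs | ⟨i, (rfl | hi), hrest⟩)
      · exact Or.inl (Or.inl hs)
      · exact Or.inl (Or.inr hrest)
      · exact Or.inr ⟨i, hi, hrest⟩

-- a nonempty keyword occurs as a prefix of some drop i, i < length ↔ it is a substring
theorem exists_range_prefix_iff_isIn (kw msg : String) (hne : kw.toList ≠ []) :
    (∃ i ∈ List.range msg.toList.length, kw.toList <+: msg.toList.drop i) ↔
      PySem.Str.isIn kw msg = true := by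
  rw [PySem.Str.isIn_eq, ← PySem.Chars.exists_prefix_drop_iff_isIn]
  constructor
  · rintro ⟨i, _, h⟩; exact ⟨i, h⟩
  · rintro ⟨j, h⟩
    by_cases hj : j < msg.toList.length
    · exact ⟨j, List.mem_range.mpr hj, h⟩
    · exfalso
      have : msg.toList.drop j = [] := List.drop_eq_nil_of_le (Nat.le_of_not_lt hj)
      rw [this] at h
      exact hne (List.prefix_nil.mp h)

-- capability membership in found ↔ the corresponding A-side condition
theorem mem_found_iff (msg : String) (c : String) :
    c ∈ (List.range msg.toList.length).foldl
        (fun s i => keywordToCap.foldl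
          (fun s p => if p.1.toList.isPrefixOf (msg.toList.drop i) then PySem.Set.add s p.2 else s) s)
        PySem.Set.empty ↔
      ∃ p ∈ keywordToCap, PySem.Str.isIn p.1 msg = true ∧ p.2 = c := by
  rw [mem_outer_fold]
  constructor
  · rintro (h | ⟨i, hi, p, hp, h1, h2⟩)
    · simp [PySem.Set.empty] at h
    · refine ⟨p, hp, ?_, h2⟩
      rw [← exists_range_prefix_iff_isIn p.1 msg]
      · exact ⟨i, hi, h1⟩
      · simp only [keywordToCap, List.mem_cons, List.not_mem_nil, or_false] at hp
        rcases hp with rfl|rfl|rfl|rfl|rfl|rfl|rfl|rfl|rfl|rfl|rfl|rfl|rfl|rfl|rfl|rfl|rfl <;> simp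
  · rintro ⟨p, hp, h1, h2⟩
    have hne : p.1.toList ≠ [] := by
      simp only [keywordToCap, List.mem_cons, List.not_mem_nil, or_false] at hp
      rcases hp with rfl|rfl|rfl|rfl|rfl|rfl|rfl|rfl|rfl|rfl|rfl|rfl|rfl|rfl|rfl|rfl|rfl <;> simp
    rw [← exists_range_prefix_iff_isIn p.1 msg hne] at h1
    obtain ⟨i, hi, hpre⟩ := h1
    exact Or.inr ⟨i, hi, p, hp, hpre, h2⟩

-- contains on the found-set, as a Bool over the keyword table
theorem contains_found_eq (msg : String) (c : String) :
    PySem.Set.contains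
      ((List.range msg.toList.length).foldl
        (fun s i => keywordToCap.foldl
          (fun s p => if p.1.toList.isPrefixOf (msg.toList.drop i) then PySem.Set.add s p.2 else s) s)
        PySem.Set.empty) c
      = keywordToCap.any (fun p => PySem.Str.isIn p.1 msg && p.2 == c) := by
  rw [Bool.eq_iff_iff, PySem.Set.contains_iff, mem_found_iff]
  simp [List.any_eq_true]

-- ===== VERDICT (by name: the statement is the Claim_ definition above) =====
theorem detect_capabilities_used_py_spec : Claim_equal_detect_capabilities_used_py := by
  intro message _
  unfold Spec_detect_capabilities_used_py detect_capabilities_used_py detect_capabilities_used_py_alt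
  simp only [capOrder, List.filter_cons, List.filter_nil, contains_found_eq]
  have hg : keywordToCap.any (fun p => PySem.Str.isIn p.1 message && p.2 == "greeting")
      = ["hello", "hi", "hey", "bye", "goodbye"].any (fun w => PySem.Str.isIn w message) := by
    rw [Bool.eq_iff_iff]; simp [keywordToCap]
  have hr : keywordToCap.any (fun p => PySem.Str.isIn p.1 message && p.2 == "random_facts")
      = (PySem.Str.isIn "fact" message || PySem.Str.isIn "random" message) := by
    rw [Bool.eq_iff_iff]; simp [keywordToCap]
  have he : keywordToCap.any (fun p => PySem.Str.isIn p.1 message && p.2 == "echo")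
      = PySem.Str.isIn "echo" message := by
    rw [Bool.eq_iff_iff]; simp [keywordToCap]
  have hm : keywordToCap.any (fun p => PySem.Str.isIn p.1 message && p.2 == "math_calculations")
      = ["calculate", "math", "+", "-", "*", "/"].any (fun w => PySem.Str.isIn w message) := by
    rw [Bool.eq_iff_iff]; simp [keywordToCap]
  have hs : keywordToCap.any (fun p => PySem.Str.isIn p.1 message && p.2 == "system_info")
      = (PySem.Str.isIn "status" message || PySem.Str.isIn "info" message || PySem.Str.isIn "help" message) := by
    rw [Bool.eq_iff_iff]; simp [keywordToCap]; tauto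
  rw [hg, hr, he, hm, hs]
  by_cases c1 : (["hello", "hi", "hey", "bye", "goodbye"].any (fun w => PySem.Str.isIn w message)) = true <;>
  by_cases c2 : (PySem.Str.isIn "fact" message || PySem.Str.isIn "random" message) = true <;>
  by_cases c3 : (PySem.Str.isIn "echo" message) = true <;>
  by_cases c4 : (["calculate", "math", "+", "-", "*", "/"].any (fun w => PySem.Str.isIn w message)) = true <;>
  by_cases c5 : (PySem.Str.isIn "status" message || PySem.Str.isIn "info" message || PySem.Str.isIn "help" message) = true <;>
  simp_all
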